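-- pv_equiv track=rewrite | github.com/Andrew-Mereuta/networking | temporal_network.py | first_contact_in_network
-- ===== SOURCE A (Python) =====
-- def first_contact_in_network(edges_by_timestamp):
--     first_contact = {}
--     for (timestamp, edges) in edges_by_timestamp.items():
--         for (n1, n2) in edges:
--             if n1 in first_contact:
--                 first_contact[n1] = min(timestamp, first_contact[n1])
--             else:
--                 first_contact[n1] = timestamp
--             if n2 in first_contact:
--                 first_contact[n2] = min(timestamp, first_contact[n2])
--             else:
--                 first_contact[n2] = timestamp
--     first_contact = dict(sorted(first_contact.items(), key=lambda item: item[1], reverse=True))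
--     sorted_grouped = {}
--     for key, val in sorted(first_contact.items()):
--         if val in sorted_grouped:
--             sorted_grouped[val].append(key)
--         else:
--             sorted_grouped[val] = [key]
--     return dict(sorted(sorted_grouped.items(), key=lambda x: x[0]))
-- ===== SOURCE B (Python) =====
-- def first_contact_in_network(edges_by_timestamp):
--     occurrences = sorted({(t, n) for t, edges in edges_by_timestamp.items()
--                           for edge in edges for n in edge})
--     result = {}
--     seen = set()
--     for t, n in occurrences:
--         if n not in seen:
--             seen.add(n)
--             result.setdefault(t, []).append(n)
--     return result
-- ===== Notes on version B (the rewrite author's own statement) =====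
-- stated objective: alternative
-- what changed: B drops A's per-node minimum-timestamp dict and its three sorting passes entirely: it flattens the input to the distinct (timestamp, node) occurrence pairs, sorts them once lexicographically, and a single sweep with a seen-set keeps each node's first occurrence, grouping it under its timestamp via setdefault.
import Mathlib
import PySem

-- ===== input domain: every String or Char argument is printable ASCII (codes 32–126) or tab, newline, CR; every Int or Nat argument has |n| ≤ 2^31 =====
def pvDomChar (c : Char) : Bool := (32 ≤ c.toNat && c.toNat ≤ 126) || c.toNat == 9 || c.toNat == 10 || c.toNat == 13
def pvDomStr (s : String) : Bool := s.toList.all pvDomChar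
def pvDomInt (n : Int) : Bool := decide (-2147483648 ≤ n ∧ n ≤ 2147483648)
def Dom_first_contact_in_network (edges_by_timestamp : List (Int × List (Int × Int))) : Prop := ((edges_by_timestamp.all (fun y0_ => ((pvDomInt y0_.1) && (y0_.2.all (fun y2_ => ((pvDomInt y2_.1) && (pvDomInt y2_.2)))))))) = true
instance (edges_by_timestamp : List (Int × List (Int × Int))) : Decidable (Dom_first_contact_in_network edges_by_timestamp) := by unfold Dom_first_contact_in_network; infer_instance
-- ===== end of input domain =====

-- B drops A's per-node minimum dict and its three sorting passes: it sorts the distinct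
-- (timestamp, node) occurrence pairs once and one sweep with a seen-set keeps each node's
-- first occurrence, grouped under its timestamp (objective: alternative).

-- ===== PORT A =====
-- body of A's inner 'for (n1, n2) in edges' loop (first_contact[n1] is read with getD: the key
-- is known present in that branch, so this is exact)
def pvFcStepA (timestamp : Int) (fc : PySem.Dict Int Int) (e : Int × Int) : PySem.Dict Int Int :=
  let fc1 := if fc.contains e.1 then fc.insert e.1 (min timestamp (fc.getD e.1 0))
             else fc.insert e.1 timestamp
  if fc1.contains e.2 then fc1.insert e.2 (min timestamp (fc1.getD e.2 0))
  else fc1.insert e.2 timestamp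

def first_contact_in_network (edges_by_timestamp : List (Int × List (Int × Int))) : List (Int × List Int) :=
  -- first_contact = {}; for (timestamp, edges) in …: for (n1, n2) in edges: …
  let first_contact := edges_by_timestamp.foldl (fun fc p => p.2.foldl (pvFcStepA p.1) fc) PySem.Dict.empty
  -- first_contact = dict(sorted(first_contact.items(), key=lambda item: item[1], reverse=True))
  let first_contact2 := PySem.Dict.ofList (PySem.List.sorted first_contact.items (fun it => it.2) true)
  -- for key, val in sorted(first_contact.items()): …  (Python compares the (key, val) tuples lexicographically)
  let sorted_grouped := (PySem.List.sorted2 first_contact2.items (fun it => it.1) (fun it => it.2)).foldl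
      (fun (g : PySem.Dict Int (List Int)) kv =>
        if g.contains kv.2 then g.insert kv.2 (g.getD kv.2 [] ++ [kv.1]) else g.insert kv.2 [kv.1])
      PySem.Dict.empty
  -- return dict(sorted(sorted_grouped.items(), key=lambda x: x[0]))
  (PySem.Dict.ofList (PySem.List.sorted sorted_grouped.items (fun x => x.1))).items

-- ===== PORT B =====
-- the (t, n) pairs generated by B's set comprehension, in generator order
def pvOccPairs (edges_by_timestamp : List (Int × List (Int × Int))) : List (Int × Int) :=
  edges_by_timestamp.flatMap (fun p => p.2.flatMap (fun e => [(p.1, e.1), (p.1, e.2)]))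

-- loop body: 'if n not in seen: seen.add(n); result.setdefault(t, []).append(n)'
def pvSweepStep (st : PySem.Dict Int (List Int) × PySem.Set Int) (tn : Int × Int) :
    PySem.Dict Int (List Int) × PySem.Set Int :=
  if PySem.Set.contains st.2 tn.2 then st
  else (st.1.modify tn.1 [] (fun g => g ++ [tn.2]), PySem.Set.add st.2 tn.2)

def first_contact_in_network_alt (edges_by_timestamp : List (Int × List (Int × Int))) : List (Int × List Int) :=
  -- occurrences = sorted({(t, n) for …})  (tuples compared lexicographically)
  ((PySem.List.sorted2 (PySem.Set.ofList (pvOccPairs edges_by_timestamp))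
        (fun q => q.1) (fun q => q.2)).foldl
      pvSweepStep (PySem.Dict.empty, PySem.Set.empty)).1.items

-- ===== PRECONDITION & SPEC =====
def Spec_first_contact_in_network (edges_by_timestamp : List (Int × List (Int × Int))) (out : List (Int × List Int)) : Prop := out = first_contact_in_network_alt edges_by_timestamp
instance (edges_by_timestamp : List (Int × List (Int × Int))) (out : List (Int × List Int)) : Decidable (Spec_first_contact_in_network edges_by_timestamp out) := by unfold Spec_first_contact_in_network; infer_instance

-- ===== CLAIM (what is proved, stated in full; the proofs are below) =====
def Claim_equal_first_contact_in_network : Prop := ∀ (edges_by_timestamp : List (Int × List (Int × Int))), Dom_first_contact_in_network edges_by_timestamp → Spec_first_contact_in_network edges_by_timestamp (first_contact_in_network edges_by_timestamp)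

-- ===== LEMMAS AND PROOFS =====

-- the single-update form of A's first-contact loop body (used only by the proofs)
def pvFcStepB (timestamp : Int) (fc : PySem.Dict Int Int) (e : Int × Int) : PySem.Dict Int Int :=
  let fc1 := fc.insert e.1 (min (fc.getD e.1 timestamp) timestamp)
  fc1.insert e.2 (min (fc1.getD e.2 timestamp) timestamp)

lemma pvGetD_eq_of_contains {ν : Type} (d : PySem.Dict Int ν) (k : Int) (a b : ν)
    (h : d.contains k = true) : d.getD k a = d.getD k b := by
  rw [PySem.Dict.contains_eq_isSome_get?] at h
  obtain ⟨v, hv⟩ := Option.isSome_iff_exists.mp h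
  rw [PySem.Dict.getD_eq_get?_getD, PySem.Dict.getD_eq_get?_getD, hv]; rfl

lemma pvStepIns (t : Int) (fc : PySem.Dict Int Int) (n : Int) :
    (if fc.contains n then fc.insert n (min t (fc.getD n 0)) else fc.insert n t)
      = fc.insert n (min (fc.getD n t) t) := by
  by_cases h : fc.contains n = true
  · rw [if_pos h, pvGetD_eq_of_contains fc n t 0 h, min_comm]
  · rw [if_neg h, PySem.Dict.getD_of_not_contains _ _ (by simpa using h), min_self]

-- the two inner-loop bodies build literally the same dict
lemma pvStepFunEq : pvFcStepA = pvFcStepB := by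
  funext t fc e
  unfold pvFcStepA pvFcStepB
  simp only [pvStepIns]

lemma pvInsIte_nodup (t : Int) (fc : PySem.Dict Int Int) (n : Int)
    (h : fc.keys.Nodup) :
    (if fc.contains n then fc.insert n (min t (fc.getD n 0)) else fc.insert n t).keys.Nodup := by
  split <;> exact PySem.Dict.nodup_keys_insert _ _ _ h

lemma pvStepA_nodup (t : Int) (fc : PySem.Dict Int Int) (e : Int × Int)
    (h : fc.keys.Nodup) : (pvFcStepA t fc e).keys.Nodup := by
  unfold pvFcStepA
  exact pvInsIte_nodup t _ e.2 (pvInsIte_nodup t fc e.1 h)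

lemma pvInnerNodup (t : Int) (es : List (Int × Int)) (d : PySem.Dict Int Int)
    (h : d.keys.Nodup) : (es.foldl (pvFcStepA t) d).keys.Nodup := by
  induction es generalizing d with
  | nil => exact h
  | cons e es ih => exact ih _ (pvStepA_nodup t d e h)

-- keys of the first-contact dict are Nodup
lemma pvFcNodup (l : List (Int × List (Int × Int))) :
    (l.foldl (fun fc p => p.2.foldl (pvFcStepA p.1) fc) PySem.Dict.empty).keys.Nodup := by
  have H : ∀ (l : List (Int × List (Int × Int))) (d : PySem.Dict Int Int), d.keys.Nodup →
      (l.foldl (fun fc p => p.2.foldl (pvFcStepA p.1) fc) d).keys.Nodup := by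
    intro l
    induction l with
    | nil => intro d h; exact h
    | cons p l ih => intro d h; exact ih _ (pvInnerNodup p.1 p.2 d h)
  exact H l _ PySem.Dict.nodup_keys_empty

-- lexicographic order on Int pairs, and what sorted2 guarantees
def pvLexLe (a b : Int × Int) : Prop := a.1 < b.1 ∨ (a.1 = b.1 ∧ a.2 ≤ b.2)

def pvLexLt (a b : Int × Int) : Prop := a.1 < b.1 ∨ (a.1 = b.1 ∧ a.2 < b.2)

def pvLexB (a b : Int × Int) : Bool :=
  decide (a.1 < b.1) || (!decide (b.1 < a.1) && decide (a.2 < b.2))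

lemma pvInsertBy_pairwise (x : Int × Int) (ys : List (Int × Int))
    (h : ys.Pairwise pvLexLe) :
    (PySem.List.insertBy pvLexB x ys).Pairwise pvLexLe := by
  induction ys with
  | nil => simp [PySem.List.insertBy]
  | cons y ys ih =>
    rcases h with _ | ⟨hy, hys⟩
    rw [PySem.List.insertBy]
    split
    · rename_i hb
      refine List.Pairwise.cons ?_ (List.Pairwise.cons hy hys)
      intro z hz
      rcases List.mem_cons.mp hz with rfl | hz
      · unfold pvLexB at hb; unfold pvLexLe; simp at hb; omega
      · have := hy z hz
        unfold pvLexB at hb; unfold pvLexLe at this ⊢; simp at hb; omega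
    · rename_i hb
      refine List.Pairwise.cons ?_ (ih hys)
      intro z hz
      rcases (PySem.List.mem_insertBy _ _ _ _).mp hz with rfl | hz
      · unfold pvLexB at hb; unfold pvLexLe; simp at hb; omega
      · exact hy z hz

lemma pvSorted2_pairwise (xs : List (Int × Int)) :
    (PySem.List.sorted2 xs (fun q => q.1) (fun q => q.2)).Pairwise pvLexLe := by
  show (List.foldl (fun acc x => PySem.List.insertBy pvLexB x acc) [] xs).Pairwise pvLexLe
  have H : ∀ (xs acc : List (Int × Int)), acc.Pairwise pvLexLe →
      (List.foldl (fun acc x => PySem.List.insertBy pvLexB x acc) acc xs).Pairwise pvLexLe := by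
    intro xs
    induction xs with
    | nil => intro acc h; exact h
    | cons x xs ih => intro acc h; exact ih _ (pvInsertBy_pairwise x acc h)
  exact H xs [] (by simp)

-- the grouping fold, characterised
def pvGroup (l : List (Int × Int)) : PySem.Dict Int (List Int) :=
  l.foldl (fun d p => d.modify p.1 [] (fun x => x ++ [p.2])) PySem.Dict.empty

lemma pvGroup_nodup (l : List (Int × Int)) : (pvGroup l).keys.Nodup :=
  PySem.Dict.nodup_keys_foldl_modify_key l (fun p => p.1) [] (fun _ p => fun x => x ++ [p.2])
    PySem.Dict.empty PySem.Dict.nodup_keys_empty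

lemma pvGroup_keys (l : List (Int × Int)) :
    (pvGroup l).keys = PySem.Set.ofList (l.map (fun p => p.1)) := by
  have h := PySem.Dict.keys_foldl_modify_key l (fun p => p.1) []
      (fun _ p => fun x => x ++ [p.2]) PySem.Dict.empty
  rw [PySem.Dict.keys_empty] at h
  rw [show (pvGroup l).keys
        = (List.foldl (fun d x => d.modify x.1 [] (fun v => v ++ [x.2])) PySem.Dict.empty l).keys
      from rfl]
  rw [h]
  exact PySem.Set.update_empty _

lemma pvGroup_items (l : List (Int × Int)) :
    (pvGroup l).items
      = (PySem.Set.ofList (l.map (fun p => p.1))).map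
          (fun t => (t, (l.filter (fun p => p.1 == t)).map (fun p => p.2))) := by
  rw [PySem.Dict.items_eq_map_keys _ (pvGroup_nodup l) [], pvGroup_keys]
  apply List.map_congr_left
  intro t _
  have h := PySem.Dict.getD_foldl_modify_append l PySem.Dict.empty t
  rw [PySem.Dict.getD_empty, List.nil_append] at h
  rw [show (pvGroup l).getD t []
        = (List.foldl (fun d p => d.modify p.1 [] (fun x => x ++ [p.2])) PySem.Dict.empty l).getD t []
      from rfl]
  rw [h]

-- dict() of a list with distinct keys keeps the list as its items
lemma pvOfList_items {ν : Type} (S : List (Int × ν)) (h : (S.map (fun p => p.1)).Nodup) :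
    (PySem.Dict.ofList S).items = S := by
  have h0 : (PySem.Dict.empty : PySem.Dict Int ν).items = [] := rfl
  have key := PySem.Dict.items_foldl_insert_fresh S (fun p => p.1) (fun p => p.2)
      PySem.Dict.empty (fun a _ => PySem.Dict.contains_empty _) h
  simp only [h0, List.nil_append] at key
  calc (PySem.Dict.ofList S).items
      = (List.foldl (fun (d : PySem.Dict Int ν) a => d.insert a.1 a.2) PySem.Dict.empty S).items := rfl
    _ = List.map (fun a => (a.1, a.2)) S := key
    _ = S := by simp

lemma pvOfList_pairwise_lt (xs : List Int) (h : xs.Pairwise (· ≤ ·)) :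
    (PySem.Set.ofList xs).Pairwise (· < ·) := by
  induction xs with
  | nil => simp [PySem.Set.ofList_nil]
  | cons x xs ih =>
    rw [PySem.Set.ofList_cons]
    rcases h with _ | ⟨hx, hxs⟩
    refine List.Pairwise.cons ?_ ?_
    · intro y hy
      have hmem := (PySem.Set.mem_discard _ _ _).mp hy
      have hyx : y ∈ xs := (PySem.Set.mem_ofList _ _).mp hmem.1
      have := hx y hyx
      have hne := hmem.2
      omega
    · exact List.Pairwise.filter _ (ih hxs)

-- two strictly increasing rearrangements of the same list are equal
lemma pvEq_of_perm_lt (X Y : List Int) (h : X.Perm Y)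
    (hX : X.Pairwise (· < ·)) (hY : Y.Pairwise (· < ·)) : X = Y := by
  have e1 := PySem.List.sorted_eq_of_perm_of_pairwise_lt X X (fun x => x) (List.Perm.refl X) hX
  have e2 := PySem.List.sorted_eq_of_perm_of_pairwise_lt X Y (fun x => x) h.symm hY
  exact e1.symm.trans e2

-- A's membership-tested grouping step IS a setdefault-append (modify) step
lemma pvGroupStepEq :
    (fun (g : PySem.Dict Int (List Int)) (kv : Int × Int) =>
        if g.contains kv.2 then g.insert kv.2 (g.getD kv.2 [] ++ [kv.1]) else g.insert kv.2 [kv.1])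
      = (fun (g : PySem.Dict Int (List Int)) (kv : Int × Int) =>
          g.modify kv.2 [] (fun x => x ++ [kv.1])) := by
  funext g kv
  show _ = g.insert kv.2 (g.getD kv.2 [] ++ [kv.1])
  by_cases h : g.contains kv.2 = true
  · rw [if_pos h]
  · rw [if_neg h, PySem.Dict.getD_of_not_contains _ _ (by simpa using h), List.nil_append]

-- A's sort/group/sort pipeline equals grouping the lex-sorted first-contact (t, n) pairs, for
-- any first-contact item list P with distinct keys
lemma pvMain (P : List (Int × Int)) (hndP : (P.map (fun p => p.1)).Nodup) :
    (PySem.Dict.ofList (PySem.List.sorted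
        ((PySem.List.sorted2 (PySem.Dict.ofList (PySem.List.sorted P (fun it => it.2) true)).items
            (fun it => it.1) (fun it => it.2)).foldl
          (fun (g : PySem.Dict Int (List Int)) (kv : Int × Int) =>
            g.modify kv.2 [] (fun x => x ++ [kv.1]))
          PySem.Dict.empty).items
        (fun x => x.1))).items
    = (pvGroup (PySem.List.sorted2 (P.map (fun p => (p.2, p.1))) (fun q => q.1) (fun q => q.2))).items := by
  have hS : (PySem.List.sorted P (fun it => it.2) true).Perm P := PySem.List.sorted_perm _ _ _
  have hSnd : ((PySem.List.sorted P (fun it => it.2) true).map (fun p => p.1)).Nodup :=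
    ((hS.map _).nodup_iff).mpr hndP
  rw [pvOfList_items _ hSnd]
  set S := PySem.List.sorted P (fun it => it.2) true
  set s1 := PySem.List.sorted2 S (fun it => it.1) (fun it => it.2)
  have hs1P : s1.Perm P := (PySem.List.sorted2_perm _ _ _ _).trans hS
  have hs1lex : s1.Pairwise pvLexLe := pvSorted2_pairwise S
  have hs1fstnd : (s1.map (fun p => p.1)).Nodup := ((hs1P.map _).nodup_iff).mpr hndP
  have hs1ne : s1.Pairwise (fun a b => a.1 ≠ b.1) := List.pairwise_map.mp hs1fstnd
  have hs1lt : s1.Pairwise (fun a b => a.1 < b.1) :=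
    (hs1lex.and hs1ne).imp (by intro a b h; rcases h with ⟨hl, hne⟩; unfold pvLexLe at hl; omega)
  set M := s1.map (fun kv => (kv.2, kv.1)) with hMdef
  have hfold : s1.foldl
      (fun (g : PySem.Dict Int (List Int)) (kv : Int × Int) => g.modify kv.2 [] (fun x => x ++ [kv.1]))
      PySem.Dict.empty = pvGroup M := by
    unfold pvGroup
    rw [hMdef, List.foldl_map]
  rw [hfold]
  set L := PySem.List.sorted2 (P.map (fun p => (p.2, p.1))) (fun q => q.1) (fun q => q.2)
  have hML : M.Perm L := (hs1P.map _).trans (PySem.List.sorted2_perm _ _ _ _).symm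
  have hLlex : L.Pairwise pvLexLe := pvSorted2_pairwise _
  have hLP : L.Perm (P.map (fun p => (p.2, p.1))) := PySem.List.sorted2_perm _ _ _ _
  have hPsndnd : ((P.map (fun p => (p.2, p.1))).map (fun p => p.2)).Nodup := by
    rw [List.map_map]; exact hndP
  have hLsndnd : (L.map (fun p => p.2)).Nodup := ((hLP.map _).nodup_iff).mpr hPsndnd
  have hLne : L.Pairwise (fun a b => a.2 ≠ b.2) := List.pairwise_map.mp hLsndnd
  have hgroups : ∀ t : Int, (M.filter (fun p => p.1 == t)).map (fun p => p.2)
      = (L.filter (fun p => p.1 == t)).map (fun p => p.2) := by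
    intro t
    have hperm : ((M.filter (fun p => p.1 == t)).map (fun p => p.2)).Perm
        ((L.filter (fun p => p.1 == t)).map (fun p => p.2)) := (hML.filter _).map _
    have hMlt : ((M.filter (fun p => p.1 == t)).map (fun p => p.2)).Pairwise (· < ·) := by
      rw [List.pairwise_map]
      refine List.Pairwise.filter _ ?_
      rw [hMdef, List.pairwise_map]
      exact hs1lt
    have hLlt : ((L.filter (fun p => p.1 == t)).map (fun p => p.2)).Pairwise (· < ·) := by
      rw [List.pairwise_map]
      refine List.Pairwise.imp_of_mem ?_ (List.Pairwise.filter _ (hLlex.and hLne))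
      intro a b ha hb hab
      have ha' := (List.mem_filter.mp ha).2
      have hb' := (List.mem_filter.mp hb).2
      simp at ha' hb'
      rcases hab with ⟨hl, hne⟩
      unfold pvLexLe at hl
      omega
    exact pvEq_of_perm_lt _ _ hperm hMlt hLlt
  have hsetnd_M := PySem.Set.nodup_ofList (M.map (fun p => p.1))
  have hsetnd_L := PySem.Set.nodup_ofList (L.map (fun p => p.1))
  have hsetperm : (PySem.Set.ofList (L.map (fun p => p.1))).Perm
      (PySem.Set.ofList (M.map (fun p => p.1))) := by
    rw [List.perm_ext_iff_of_nodup hsetnd_L hsetnd_M]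
    intro t
    rw [PySem.Set.mem_ofList, PySem.Set.mem_ofList]
    exact ((hML.map (fun p => p.1)).mem_iff).symm
  have hGMnd : ((pvGroup M).items.map (fun p => p.1)).Nodup := by
    have e : (pvGroup M).items.map (fun p => p.1) = PySem.Set.ofList (M.map (fun p => p.1)) := by
      rw [pvGroup_items, List.map_map]
      exact List.map_id' _
    rw [e]; exact hsetnd_M
  have hTperm : (PySem.List.sorted (pvGroup M).items (fun x => x.1)).Perm (pvGroup M).items :=
    PySem.List.sorted_perm _ _ _
  have hTnd : ((PySem.List.sorted (pvGroup M).items (fun x => x.1)).map (fun p => p.1)).Nodup :=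
    ((hTperm.map (fun p => p.1)).nodup_iff).mpr hGMnd
  rw [pvOfList_items _ hTnd]
  apply PySem.List.sorted_eq_of_perm_of_pairwise_lt
  · rw [pvGroup_items, pvGroup_items]
    have hmc : (PySem.Set.ofList (L.map (fun p => p.1))).map
          (fun t => (t, (L.filter (fun p => p.1 == t)).map (fun p => p.2)))
        = (PySem.Set.ofList (L.map (fun p => p.1))).map
          (fun t => (t, (M.filter (fun p => p.1 == t)).map (fun p => p.2))) :=
      List.map_congr_left (fun t _ => by rw [hgroups t])
    rw [hmc]
    exact hsetperm.map _
  · rw [pvGroup_items, List.pairwise_map]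
    have hLfstle : (L.map (fun p => p.1)).Pairwise (· ≤ ·) := by
      rw [List.pairwise_map]
      exact hLlex.imp (by intro a b h; unfold pvLexLe at h; omega)
    exact pvOfList_pairwise_lt _ hLfstle

-- ========== NEW: characterising B's occurrence sweep ==========

-- single-pair update of the first-contact dict
def pvUpd (fc : PySem.Dict Int Int) (q : Int × Int) : PySem.Dict Int Int :=
  fc.insert q.2 (min (fc.getD q.2 q.1) q.1)

lemma pvFoldB_inner (t : Int) (es : List (Int × Int)) (d : PySem.Dict Int Int) :
    es.foldl (pvFcStepB t) d
      = (es.flatMap (fun e => [(t, e.1), (t, e.2)])).foldl pvUpd d := by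
  induction es generalizing d with
  | nil => rfl
  | cons e es ih =>
    rw [List.flatMap_cons, List.foldl_append, List.foldl_cons]
    exact ih _

lemma pvFoldB_eq_occ (l : List (Int × List (Int × Int))) (d : PySem.Dict Int Int) :
    l.foldl (fun fc p => p.2.foldl (pvFcStepB p.1) fc) d = (pvOccPairs l).foldl pvUpd d := by
  induction l generalizing d with
  | nil => rfl
  | cons p l ih =>
    rw [List.foldl_cons]
    unfold pvOccPairs
    rw [List.flatMap_cons, List.foldl_append]
    rw [ih (p.2.foldl (pvFcStepB p.1) d), pvFoldB_inner]
    rfl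

-- the running-minimum step the update performs on one key
def pvMinStep (n : Int) (o : Option Int) (q : Int × Int) : Option Int :=
  if q.2 = n then some (match o with | none => q.1 | some m => min m q.1) else o

lemma pvUpd_get? (fc : PySem.Dict Int Int) (q : Int × Int) (n : Int) :
    (pvUpd fc q).get? n = pvMinStep n (fc.get? n) q := by
  unfold pvUpd pvMinStep
  by_cases h : q.2 = n
  · subst h
    rw [if_pos rfl, PySem.Dict.get?_insert_self]
    rw [PySem.Dict.getD_eq_get?_getD]
    cases fc.get? q.2 with
    | none => simp
    | some m => simp
  · rw [if_neg h]
    exact PySem.Dict.get?_insert_of_ne fc _ (fun hn : n = q.2 => h hn.symm)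

lemma pvFoldUpd_get? (ps : List (Int × Int)) (d : PySem.Dict Int Int) (n : Int) :
    (ps.foldl pvUpd d).get? n = ps.foldl (pvMinStep n) (d.get? n) := by
  induction ps generalizing d with
  | nil => rfl
  | cons q ps ih =>
    rw [List.foldl_cons, List.foldl_cons, ih, pvUpd_get?]

-- the running minimum computes exactly 'a minimal occurrence time'
lemma pvMinFold_spec (ps : List (Int × Int)) (n : Int) :
    ∀ (o : Option Int) (t : Int),
      ps.foldl (pvMinStep n) o = some t ↔
        ((o = some t ∨ (t, n) ∈ ps) ∧ (∀ m, o = some m → t ≤ m) ∧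
          (∀ t', (t', n) ∈ ps → t ≤ t')) := by
  induction ps with
  | nil =>
    intro o t
    simp only [List.foldl_nil, List.not_mem_nil, or_false, false_implies, implies_true, and_true]
    constructor
    · intro h; exact ⟨h, fun m hm => by rw [h] at hm; cases hm; exact le_refl t⟩
    · intro h; exact h.1
  | cons q ps ih =>
    intro o t
    obtain ⟨q1, q2⟩ := q
    rw [List.foldl_cons, ih]
    unfold pvMinStep
    by_cases hq : q2 = n
    · subst hq
      rw [if_pos rfl]
      cases o with
      | none =>
        simp only [Option.some.injEq, List.mem_cons, Prod.mk.injEq, and_true,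
          reduceCtorEq, false_or, false_implies, implies_true, true_and, or_imp, forall_and,
          forall_eq]
        constructor
        · rintro ⟨h1, h2, h3⟩
          refine ⟨by tauto, ?_, h3⟩
          exact h2 q1 rfl
        · rintro ⟨h1, h2, h3⟩
          refine ⟨by tauto, ?_, h3⟩
          intro m hm; omega
      | some m0 =>
        constructor
        · rintro ⟨h1, h2, h3⟩
          have hmin : t ≤ min m0 q1 := h2 _ rfl
          have hm0 : t ≤ m0 := le_trans hmin (min_le_left _ _)
          have hq1 : t ≤ q1 := le_trans hmin (min_le_right _ _)
          refine ⟨?_, ?_, ?_⟩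
          · rcases h1 with h1 | h1
            · have ht : min m0 q1 = t := Option.some.inj h1
              rcases le_total m0 q1 with hc | hc
              · left
                rw [← ht, min_eq_left hc]
              · right
                refine List.mem_cons.mpr (Or.inl ?_)
                rw [Prod.mk.injEq]
                rw [min_eq_right hc] at ht
                exact ⟨ht.symm, rfl⟩
            · right; exact List.mem_cons.mpr (Or.inr h1)
          · intro m hm
            rw [← Option.some.inj hm]
            exact hm0
          · intro t' ht'
            rcases List.mem_cons.mp ht' with he | hmem
            · have ht : t' = q1 := congrArg Prod.fst he
              rw [ht]; exact hq1
            · exact h3 t' hmem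
        · rintro ⟨h1, h2, h3⟩
          have hm0 : t ≤ m0 := h2 _ rfl
          have hq1 : t ≤ q1 := h3 q1 (List.mem_cons.mpr (Or.inl rfl))
          refine ⟨?_, ?_, fun t' ht' => h3 t' (List.mem_cons.mpr (Or.inr ht'))⟩
          · rcases h1 with h1 | h1
            · have ht : m0 = t := Option.some.inj h1
              left
              rw [← ht]
              exact congrArg some (min_eq_left (ht ▸ hq1))
            · rcases List.mem_cons.mp h1 with he | hmem
              · have ht : t = q1 := congrArg Prod.fst he
                left
                rw [← ht]
                exact congrArg some (min_eq_right hm0)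
              · right; exact hmem
          · intro m hm
            rw [← Option.some.inj hm]
            exact le_min hm0 hq1
    · rw [if_neg hq]
      have hmem : ∀ t' : Int, (t', n) ∈ (q1, q2) :: ps ↔ (t', n) ∈ ps := by
        intro t'
        simp only [List.mem_cons, Prod.mk.injEq]
        constructor
        · rintro (⟨_, h⟩ | h)
          · exact absurd h.symm hq
          · exact h
        · exact Or.inr
      constructor
      · rintro ⟨h1, h2, h3⟩
        refine ⟨?_, h2, ?_⟩
        · rcases h1 with h1 | h1
          · left; exact h1
          · right; exact (hmem t).mpr h1
        · intro t' ht'; exact h3 t' ((hmem t').mp ht')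
      · rintro ⟨h1, h2, h3⟩
        refine ⟨?_, h2, ?_⟩
        · rcases h1 with h1 | h1
          · left; exact h1
          · right; exact (hmem t).mp h1
        · intro t' ht'; exact h3 t' ((hmem t').mpr ht')

-- the sublist of first occurrences the sweep keeps
def pvFirsts (S : PySem.Set Int) : List (Int × Int) → List (Int × Int)
  | [] => []
  | q :: qs =>
      if PySem.Set.contains S q.2 then pvFirsts S qs
      else q :: pvFirsts (PySem.Set.add S q.2) qs

lemma pvSweep_fst (xs : List (Int × Int)) :
    ∀ (r : PySem.Dict Int (List Int)) (S : PySem.Set Int),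
      (xs.foldl pvSweepStep (r, S)).1
        = (pvFirsts S xs).foldl (fun d p => d.modify p.1 [] (fun x => x ++ [p.2])) r := by
  induction xs with
  | nil => intro r S; rfl
  | cons q xs ih =>
    intro r S
    rw [List.foldl_cons]
    unfold pvSweepStep pvFirsts
    by_cases h : PySem.Set.contains S q.2 = true
    · rw [if_pos h, if_pos h]
      exact ih r S
    · rw [if_neg h, if_neg h, List.foldl_cons]
      exact ih _ _

lemma pvFirsts_sublist (xs : List (Int × Int)) :
    ∀ S : PySem.Set Int, (pvFirsts S xs).Sublist xs := by
  induction xs with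
  | nil => intro S; exact List.Sublist.refl []
  | cons q xs ih =>
    intro S
    unfold pvFirsts
    by_cases h : PySem.Set.contains S q.2 = true
    · rw [if_pos h]; exact (ih S).cons q
    · rw [if_neg h]; exact (ih _).cons₂ q

-- membership in the kept sublist = 'unseen node, and minimal occurrence time'
lemma pvFirsts_mem (xs : List (Int × Int)) :
    ∀ (S : PySem.Set Int), xs.Pairwise pvLexLe → ∀ (t n : Int),
      ((t, n) ∈ pvFirsts S xs ↔
        (n ∉ S ∧ (t, n) ∈ xs ∧ ∀ t', (t', n) ∈ xs → t ≤ t')) := by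
  induction xs with
  | nil =>
    intro S _ t n
    simp [pvFirsts]
  | cons q xs ih =>
    intro S hp t n
    obtain ⟨q1, q2⟩ := q
    rcases hp with _ | ⟨hq, hxs⟩
    unfold pvFirsts
    by_cases h : PySem.Set.contains S q2 = true
    · rw [if_pos h]
      have hmemS : q2 ∈ S := (PySem.Set.contains_iff _ _).mp h
      by_cases hn : n = q2
      · subst hn
        constructor
        · intro hmem
          exact absurd hmemS ((ih S hxs t n).mp hmem).1
        · rintro ⟨h1, _, _⟩
          exact absurd hmemS h1
      · rw [ih S hxs t n]
        have hmm : ∀ t' : Int, (t', n) ∈ (q1, q2) :: xs ↔ (t', n) ∈ xs := by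
          intro t'
          simp only [List.mem_cons, Prod.mk.injEq]
          constructor
          · rintro (⟨_, h2⟩ | h2)
            · exact absurd h2 hn
            · exact h2
          · exact Or.inr
        constructor
        · rintro ⟨h1, h2, h3⟩
          exact ⟨h1, (hmm t).mpr h2, fun t' ht' => h3 t' ((hmm t').mp ht')⟩
        · rintro ⟨h1, h2, h3⟩
          exact ⟨h1, (hmm t).mp h2, fun t' ht' => h3 t' ((hmm t').mpr ht')⟩
    · rw [if_neg h]
      have hnotS : q2 ∉ S := fun hm => h ((PySem.Set.contains_iff _ _).mpr hm)
      rw [List.mem_cons, ih _ hxs t n]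
      by_cases hn : n = q2
      · subst hn
        have hadd : n ∈ PySem.Set.add S n := (PySem.Set.mem_add _ _ _).mpr (Or.inr rfl)
        constructor
        · rintro (h1 | h1)
          · rw [Prod.mk.injEq] at h1
            obtain ⟨rfl, _⟩ := h1
            refine ⟨hnotS, List.mem_cons_self, ?_⟩
            intro t' ht'
            rcases List.mem_cons.mp ht' with h2 | h2
            · rw [Prod.mk.injEq] at h2; omega
            · have := hq _ h2
              unfold pvLexLe at this
              omega
          · exact absurd hadd h1.1
        · rintro ⟨_, h2, h3⟩
          left
          have ht1 : t ≤ q1 := h3 q1 List.mem_cons_self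
          rcases List.mem_cons.mp h2 with h4 | h4
          · exact h4
          · have := hq _ h4
            unfold pvLexLe at this
            rw [Prod.mk.injEq]
            constructor
            · omega
            · rfl
      · have haddn : (n ∈ PySem.Set.add S q2) ↔ n ∈ S := by
          rw [PySem.Set.mem_add]
          constructor
          · rintro (h1 | h1)
            · exact h1
            · exact absurd h1 hn
          · exact Or.inl
        have hmm : ∀ t' : Int, (t', n) ∈ (q1, q2) :: xs ↔ (t', n) ∈ xs := by
          intro t'
          simp only [List.mem_cons, Prod.mk.injEq]
          constructor
          · rintro (⟨_, h2⟩ | h2)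
            · exact absurd h2 hn
            · exact h2
          · exact Or.inr
        constructor
        · rintro (h1 | ⟨h1, h2, h3⟩)
          · rw [Prod.mk.injEq] at h1
            exact absurd h1.2 hn
          · exact ⟨fun hm => h1 (haddn.mpr hm), (hmm t).mpr h2,
              fun t' ht' => h3 t' ((hmm t').mp ht')⟩
        · rintro ⟨h1, h2, h3⟩
          right
          exact ⟨fun hm => h1 (haddn.mp hm), (hmm t).mp h2,
            fun t' ht' => h3 t' ((hmm t').mpr ht')⟩

lemma pvLexLt_of_le_ne {a b : Int × Int} (h : pvLexLe a b) (hne : a ≠ b) : pvLexLt a b := by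
  obtain ⟨a1, a2⟩ := a
  obtain ⟨b1, b2⟩ := b
  unfold pvLexLe at h
  unfold pvLexLt
  rw [Ne, Prod.mk.injEq] at hne
  simp only at h ⊢
  omega

-- two pvLexLt-sorted lists with the same members are equal
lemma pvListEq (X Y : List (Int × Int)) (hX : X.Pairwise pvLexLt) (hY : Y.Pairwise pvLexLt)
    (hmem : ∀ a, a ∈ X ↔ a ∈ Y) : X = Y := by
  have hXnd : X.Nodup := hX.imp (by
    intro a b h he
    subst he
    unfold pvLexLt at h
    omega)
  have hYnd : Y.Nodup := hY.imp (by
    intro a b h he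
    subst he
    unfold pvLexLt at h
    omega)
  have hperm : X.Perm Y := (List.perm_ext_iff_of_nodup hXnd hYnd).mpr hmem
  haveI : Std.Antisymm pvLexLe := ⟨by
    intro a b h1 h2
    obtain ⟨a1, a2⟩ := a
    obtain ⟨b1, b2⟩ := b
    unfold pvLexLe at h1 h2
    simp only at h1 h2
    rw [Prod.mk.injEq]
    omega⟩
  have hXle : X.Pairwise pvLexLe :=
    hX.imp (by intro a b h; unfold pvLexLt at h; unfold pvLexLe; omega)
  have hYle : Y.Pairwise pvLexLe :=
    hY.imp (by intro a b h; unfold pvLexLt at h; unfold pvLexLe; omega)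
  exact List.Perm.eq_of_pairwise' hXle hYle hperm

-- the sweep's kept sublist IS the lex-sorted list of first-contact (t, n) pairs
lemma pvFirstsEqL (l : List (Int × List (Int × Int))) :
    pvFirsts PySem.Set.empty
        (PySem.List.sorted2 (PySem.Set.ofList (pvOccPairs l)) (fun q => q.1) (fun q => q.2))
      = PySem.List.sorted2
          (((l.foldl (fun fc p => p.2.foldl (pvFcStepB p.1) fc) PySem.Dict.empty).items).map
            (fun p => (p.2, p.1)))
          (fun q => q.1) (fun q => q.2) := by
  set pairs := pvOccPairs l with hpairs
  set occs := PySem.List.sorted2 (PySem.Set.ofList pairs) (fun q => q.1) (fun q => q.2) with hoccs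
  set fc := l.foldl (fun fc p => p.2.foldl (pvFcStepB p.1) fc) PySem.Dict.empty with hfc
  set L := PySem.List.sorted2 (fc.items.map (fun p => (p.2, p.1))) (fun q => q.1) (fun q => q.2)
    with hL
  have hoccP : occs.Perm (PySem.Set.ofList pairs) := PySem.List.sorted2_perm _ _ _ _
  have hoccle : occs.Pairwise pvLexLe := pvSorted2_pairwise _
  have hoccnd : occs.Nodup := (hoccP.nodup_iff).mpr (PySem.Set.nodup_ofList pairs)
  have hocclt : occs.Pairwise pvLexLt := (hoccle.and hoccnd).imp
    (fun h => pvLexLt_of_le_ne h.1 h.2)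
  have hfcnd : (fc.items.map (fun p => p.1)).Nodup := by
    have h := pvFcNodup l
    rw [pvStepFunEq] at h
    exact h
  have hLP : L.Perm (fc.items.map (fun p => (p.2, p.1))) := PySem.List.sorted2_perm _ _ _ _
  have hLle : L.Pairwise pvLexLe := pvSorted2_pairwise _
  have hLsndnd : (L.map (fun p => p.2)).Nodup := by
    have h2 : ((fc.items.map (fun p => (p.2, p.1))).map (fun p => p.2)).Nodup := by
      rw [List.map_map]; exact hfcnd
    exact ((hLP.map _).nodup_iff).mpr h2
  have hLne : L.Pairwise (fun a b => a.2 ≠ b.2) := List.pairwise_map.mp hLsndnd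
  have hLlt : L.Pairwise pvLexLt := (hLle.and hLne).imp (by
    intro a b h
    rcases h with ⟨hle, hne⟩
    unfold pvLexLe at hle
    unfold pvLexLt
    omega)
  apply pvListEq
  · exact List.Pairwise.sublist (pvFirsts_sublist occs PySem.Set.empty) hocclt
  · exact hLlt
  · rintro ⟨t, n⟩
    have hoccmem : ∀ a : Int × Int, a ∈ occs ↔ a ∈ pairs := by
      intro a
      rw [hoccP.mem_iff, PySem.Set.mem_ofList]
    have hemp : (n ∈ (PySem.Set.empty : PySem.Set Int)) ↔ False := by
      simp [PySem.Set.empty]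
    rw [pvFirsts_mem occs PySem.Set.empty hoccle t n]
    have hleft : (n ∉ (PySem.Set.empty : PySem.Set Int) ∧ (t, n) ∈ occs ∧
          ∀ t', (t', n) ∈ occs → t ≤ t')
        ↔ ((t, n) ∈ pairs ∧ ∀ t', (t', n) ∈ pairs → t ≤ t') := by
      constructor
      · rintro ⟨_, h2, h3⟩
        exact ⟨(hoccmem _).mp h2, fun t' ht' => h3 t' ((hoccmem _).mpr ht')⟩
      · rintro ⟨h2, h3⟩
        exact ⟨by rw [hemp]; exact not_false, (hoccmem _).mpr h2,
          fun t' ht' => h3 t' ((hoccmem _).mp ht')⟩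
    rw [hleft]
    have hget : fc.get? n = some t ↔
        ((t, n) ∈ pairs ∧ ∀ t', (t', n) ∈ pairs → t ≤ t') := by
      rw [hfc, pvFoldB_eq_occ, pvFoldUpd_get?, ← hpairs]
      rw [show (PySem.Dict.empty : PySem.Dict Int Int).get? n = none from rfl]
      rw [pvMinFold_spec pairs n none t]
      constructor
      · rintro ⟨h1, _, h3⟩
        rcases h1 with h1 | h1
        · exact absurd h1 (by simp)
        · exact ⟨h1, h3⟩
      · rintro ⟨h1, h2⟩
        refine ⟨Or.inr h1, ?_, h2⟩
        intro m hm
        exact absurd hm (by simp)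
    have hright : ((t, n) ∈ L) ↔ fc.get? n = some t := by
      rw [hLP.mem_iff]
      constructor
      · intro hm
        rcases List.mem_map.mp hm with ⟨⟨p1, p2⟩, hp, heq⟩
        rw [Prod.mk.injEq] at heq
        obtain ⟨rfl, rfl⟩ := heq
        exact PySem.Dict.get?_of_mem_items fc hp hfcnd
      · intro hm
        exact List.mem_map.mpr ⟨(n, t), PySem.Dict.mem_items_of_get?_eq_some fc hm, rfl⟩
    rw [hright, hget]

-- ===== VERDICT (by name: the statement is the Claim_ definition above) =====
theorem first_contact_in_network_spec : Claim_equal_first_contact_in_network := by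
  intro l _
  unfold Spec_first_contact_in_network
  unfold first_contact_in_network first_contact_in_network_alt
  rw [pvStepFunEq, pvGroupStepEq]
  have hnd := pvFcNodup l
  rw [pvStepFunEq] at hnd
  have hnd' : ((l.foldl (fun fc p => p.2.foldl (pvFcStepB p.1) fc)
      PySem.Dict.empty).items.map (fun p => p.1)).Nodup := hnd
  rw [pvMain _ hnd']
  rw [pvSweep_fst, pvFirstsEqL]
  rfl
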